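-- pv_equiv track=rewrite | github.com/cccp421/Sleep-Monitoring-System-Project | TGAM/version3/sleep_assessment.py | calculate_awakenings
-- ===== SOURCE A (Python) =====
-- def calculate_awakenings(df):
--     """计算觉醒次数 - 连续清醒时间超过5分钟"""
--     awaken_events = 0
--     in_wake_period = False
--     consecutive_wake = 0
--
--     for row in df['Stage_Name']:
--         if row == 'W':
--             consecutive_wake += 0.5
--             if not in_wake_period and consecutive_wake >= 5:  # 连续清醒5分钟才算一次觉醒
--                 awaken_events += 1
--                 in_wake_period = True
--         else:
--             consecutive_wake = 0
--             in_wake_period = False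
--
--     return awaken_events
-- ===== SOURCE B (Python) =====
-- def calculate_awakenings(df):
--     """计算觉醒次数 - 连续清醒时间超过5分钟
--
--     Run-length decomposition: split the stage sequence into maximal runs of
--     identical labels, then count the 'W' runs of at least 10 samples
--     (10 * 0.5 min = 5 min)."""
--     runs = []  # run-length encoding: (label, length)
--     for x in df['Stage_Name']:
--         if runs and runs[-1][0] == x:
--             runs[-1] = (x, runs[-1][1] + 1)
--         else:
--             runs.append((x, 1))
--     return sum(1 for k, n in runs if k == 'W' and n >= 10)
-- ===== Notes on version B (the rewrite author's own statement) =====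
-- stated objective: simpler
-- what changed: Replaces the in_wake_period flag and 0.5-minute float accumulator with a run-length encoding of the stage sequence followed by counting the 'W' runs of length >= 10.
-- outside the precondition, e.g. on calculate_awakenings({}): A raises KeyError, B raises KeyError
import Mathlib
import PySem

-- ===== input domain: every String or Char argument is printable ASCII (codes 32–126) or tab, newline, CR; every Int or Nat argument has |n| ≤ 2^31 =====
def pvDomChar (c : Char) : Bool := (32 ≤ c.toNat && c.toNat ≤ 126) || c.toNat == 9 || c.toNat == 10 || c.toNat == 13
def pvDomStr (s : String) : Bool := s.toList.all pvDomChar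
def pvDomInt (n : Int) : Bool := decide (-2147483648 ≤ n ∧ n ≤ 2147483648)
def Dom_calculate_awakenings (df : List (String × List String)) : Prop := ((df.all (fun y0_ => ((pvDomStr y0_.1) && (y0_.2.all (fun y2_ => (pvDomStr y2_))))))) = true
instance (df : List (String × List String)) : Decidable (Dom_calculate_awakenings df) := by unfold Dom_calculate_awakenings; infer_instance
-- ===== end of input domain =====

-- B replaces A's wake-flag/float-accumulator scan by a run-length encoding followed by
-- counting the 'W' runs of length ≥ 10 (10 samples × 0.5 min = 5 min); objective: simpler.

-- ===== PORT A =====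
-- A's consecutive_wake is a Python float stepped by 0.5; on this domain every value is an
-- exact multiple of 0.5, so ℚ models it exactly.
def pvAStep (st : Int × Bool × ℚ) (row : String) : Int × Bool × ℚ :=
  if row == "W" then
    let cw := st.2.2 + 1/2
    if (!st.2.1) && decide (cw ≥ 5) then (st.1 + 1, true, cw) else (st.1, st.2.1, cw)
  else (st.1, false, 0)

def calculate_awakenings (df : List (String × List String)) : Int :=
  match (PySem.Dict.mk df).get? "Stage_Name" with
  | some rows => (rows.foldl pvAStep (0, false, 0)).1
  | none => 0   -- unreachable under Pre_ (Python raises KeyError)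

-- ===== PORT B =====
-- Source B appends runs and updates runs[-1]; ported with the run list kept in REVERSE
-- (current run at the head) — the final count is order-independent.
def pvBStep (rs : List (String × Int)) (x : String) : List (String × Int) :=
  match rs with
  | (k, n) :: rest => if k == x then (k, n + 1) :: rest else (x, 1) :: (k, n) :: rest
  | [] => [(x, 1)]

def pvRuns (rows : List String) : List (String × Int) :=
  rows.foldl pvBStep []

def calculate_awakenings_alt (df : List (String × List String)) : Int :=
  match (PySem.Dict.mk df).get? "Stage_Name" with
  | some rows => ((pvRuns rows).countP (fun kn => kn.1 == "W" && decide (kn.2 ≥ 10)) : Int)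
  | none => 0   -- unreachable under Pre_ (Python raises KeyError)

-- ===== PRECONDITION & SPEC =====
-- Pre_ excludes exactly the dicts with no 'Stage_Name' key, on which Python A raises KeyError.
def Pre_calculate_awakenings (df : List (String × List String)) : Prop :=
  (df.any (fun p => p.1 == "Stage_Name")) = true
instance (df : List (String × List String)) : Decidable (Pre_calculate_awakenings df) := by
  unfold Pre_calculate_awakenings; infer_instance

def pvWitness_calculate_awakenings : (List (String × List String)) :=
  [("Stage_Name", ["W", "N1", "W", "W"])]

def Spec_calculate_awakenings (df : List (String × List String)) (out : Int) : Prop := out = calculate_awakenings_alt df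
instance (df : List (String × List String)) (out : Int) : Decidable (Spec_calculate_awakenings df out) := by unfold Spec_calculate_awakenings; infer_instance

-- ===== CLAIM (what is proved, stated in full; the proofs are below) =====
def Claim_equal_calculate_awakenings : Prop := ∀ (df : List (String × List String)), Dom_calculate_awakenings df → Pre_calculate_awakenings df → Spec_calculate_awakenings df (calculate_awakenings df)

-- ===== LEMMAS AND PROOFS =====

def pvGood (kn : String × Int) : Bool := kn.1 == "W" && decide (kn.2 ≥ 10)

-- invariant relating A's fold state to B's (reversed) run list
def pvInv (st : Int × Bool × ℚ) (rs : List (String × Int)) : Prop :=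
  st.1 = (rs.countP pvGood : Int) ∧
  (match rs with
   | (k, n) :: _ =>
       if k = "W" then st.2.2 = (n : ℚ) / 2 ∧ st.2.1 = decide (n ≥ 10)
       else st.2.2 = 0 ∧ st.2.1 = false
   | [] => st.2.2 = 0 ∧ st.2.1 = false)

lemma half_ge (m : Int) : ((m : ℚ) / 2 ≥ 5) ↔ m ≥ 10 := by
  rw [ge_iff_le, le_div_iff₀ (by norm_num : (0:ℚ) < 2)]
  norm_num
  exact_mod_cast Iff.rfl

lemma pvInv_step (st : Int × Bool × ℚ) (rs : List (String × Int)) (x : String)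
    (h : pvInv st rs) :
    pvInv (pvAStep st x) (pvBStep rs x) := by
  obtain ⟨e, w, c⟩ := st
  obtain ⟨h1, h2⟩ := h
  match rs with
  | [] =>
    simp only [pvInv, List.countP_nil] at h1 h2 ⊢
    obtain ⟨hc, hw⟩ := h2
    subst hc hw h1
    by_cases hx : x = "W"
    · subst hx
      simp only [pvBStep, pvAStep]
      norm_num [pvGood]
    · simp only [pvBStep, pvAStep]
      simp [pvGood, hx]
  | (k, n) :: rest =>
    by_cases hk : k = "W"
    · subst hk
      simp only at h2
      obtain ⟨hc, hw⟩ := h2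
      subst hc hw
      by_cases hx : x = "W"
      · -- extend the current W run
        subst hx
        have hadd : (n : ℚ) / 2 + 1 / 2 = ((n + 1 : Int) : ℚ) / 2 := by push_cast; ring
        simp only [pvInv, pvBStep, pvAStep, beq_self_eq_true, if_pos, hadd, half_ge] at h1 ⊢
        simp only [List.countP_cons] at h1 ⊢
        by_cases hn : n ≥ 10
        · have hn1 : n + 1 ≥ 10 := by omega
          simp [hn, hn1, h1, pvGood]
        · by_cases hn1 : n + 1 ≥ 10
          · simp [hn, hn1, h1, pvGood]
          · simp [hn, hn1, h1, pvGood]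
      · -- new non-matching run starts
        have hxk : ("W" == x) = false := by simp [Ne.symm hx]
        by_cases hx2 : x = "W"
        · exact absurd hx2 hx
        · simp [pvInv, pvBStep, pvAStep, hxk, hx2, h1, pvGood, List.countP_cons]
    · simp only [if_neg hk] at h2
      obtain ⟨hc, hw⟩ := h2
      subst hc hw
      by_cases hkx : k = x
      · subst hkx
        by_cases hx : k = "W"
        · exact absurd hx hk
        · simp [pvInv, pvBStep, pvAStep, hx, h1, pvGood]
      · have hkxb : (k == x) = false := by simp [hkx]
        by_cases hx : x = "W"
        · subst hx
          simp only [pvInv, pvBStep, pvAStep, hkxb, beq_self_eq_true, if_true, if_false, Bool.false_eq_true]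
          norm_num [pvGood, h1, List.countP_cons]
        · simp [pvInv, pvBStep, pvAStep, hkxb, hx, h1, pvGood, List.countP_cons]

lemma pvInv_foldl (rows : List String) :
    ∀ (st : Int × Bool × ℚ) (rs : List (String × Int)), pvInv st rs →
      pvInv (rows.foldl pvAStep st) (rows.foldl pvBStep rs) := by
  induction rows with
  | nil => intro st rs h; exact h
  | cons x t ih =>
    intro st rs h
    exact ih _ _ (pvInv_step st rs x h)

-- ===== VERDICT (by name: the statement is the Claim_ definition above) =====
theorem calculate_awakenings_spec : Claim_equal_calculate_awakenings := by
  intro df _ _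
  unfold Spec_calculate_awakenings calculate_awakenings calculate_awakenings_alt pvRuns
  cases h : (PySem.Dict.mk df).get? "Stage_Name" with
  | none => rfl
  | some rows =>
    have := pvInv_foldl rows (0, false, 0) [] (by simp [pvInv])
    exact this.1
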